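-- pv_equiv track=rewrite | github.com/awesomeo184/algorithm-study | problems/2021_06/boj_1541_잃어버린괄호.py | solution
-- ===== SOURCE A (Python) =====
-- import collections
-- from typing import Deque, List
--
-- def split_expr(expr: str) -> Deque:
--     result = collections.deque()
--     tmp = ""
--     i = 0
--     while i < len(expr):
--         if expr[i] == "+" or expr[i] == "-":
--             result.append(tmp)
--             result.append(expr[i])
--             tmp = ""
--         else:
--             tmp += expr[i]
--         i += 1
--     result.append(tmp)
--     return result
--
-- def solution(expr: str) -> int:
--     plusStack: List[int] = []
--     minusStack: List[int] = []
--     inputMinusStack = False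
--
--     symbols = split_expr(expr)
--
--     while len(symbols) != 0:
--         symbol: str = symbols.popleft()
--
--         if symbol == "-":
--             inputMinusStack = True
--             continue
--
--         if inputMinusStack and symbol.isdigit():
--             minusStack.append(int(symbol))
--             continue
--
--         if not inputMinusStack and symbol.isdigit():
--             plusStack.append(int(symbol))
--
--     return sum(plusStack) - sum(minusStack)
-- ===== SOURCE B (Python) =====
-- def solution(expr: str) -> int:
--     def group_sum(part):
--         return sum(int(t) for t in part.split('+') if t.isdigit())
--
--     parts = expr.split('-')
--     return group_sum(parts[0]) - sum(group_sum(p) for p in parts[1:])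
-- ===== Notes on version B (the rewrite author's own statement) =====
-- stated objective: faster
-- what changed: Replaces the deque tokenizer with character-by-character string concatenation, the never-reset flag and the two stacks by direct delimiter splitting (split on minus, then on plus) and grouped summation: first group minus the sum of the remaining groups.
import Mathlib
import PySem

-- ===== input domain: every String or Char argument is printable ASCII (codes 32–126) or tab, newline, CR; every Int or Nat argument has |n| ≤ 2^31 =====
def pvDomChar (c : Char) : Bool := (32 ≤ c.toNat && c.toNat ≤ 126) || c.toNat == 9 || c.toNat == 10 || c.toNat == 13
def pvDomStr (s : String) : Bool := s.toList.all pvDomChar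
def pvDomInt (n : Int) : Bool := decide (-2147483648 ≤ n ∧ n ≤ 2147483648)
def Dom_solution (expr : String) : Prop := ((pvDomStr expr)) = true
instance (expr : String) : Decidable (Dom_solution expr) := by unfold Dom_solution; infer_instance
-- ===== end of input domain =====

-- B replaces A's character-by-character deque tokenizer, never-reset flag and two stacks by
-- splitting on the minus delimiter and summing each plus-group directly (measured faster);
-- same return value on the whole domain.

-- ===== PORT A =====
-- split_expr: the index loop over expr, accumulating tmp and emitting tokens and delimiters
def pvSplitExprGo (cs : List Char) (tmp : List Char) : List (List Char) :=
  match cs with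
  | [] => [tmp]
  | c :: rest =>
      if c = '+' ∨ c = '-' then tmp :: [c] :: pvSplitExprGo rest []
      else pvSplitExprGo rest (tmp ++ [c])

-- the while-loop over the deque of symbols, with the two stacks and the flag
def pvSolGo (symbols : List (List Char)) (plus minus : List Int) (flag : Bool) : Int :=
  match symbols with
  | [] => plus.sum - minus.sum
  | s :: rest =>
      if s = ['-'] then pvSolGo rest plus minus true
      else if flag && PySem.Chars.strIsdigit s then
        pvSolGo rest plus (minus ++ [(PySem.Int.ofChars? s).getD 0]) flag
      else if !flag && PySem.Chars.strIsdigit s then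
        pvSolGo rest (plus ++ [(PySem.Int.ofChars? s).getD 0]) minus flag
      else pvSolGo rest plus minus flag

def solution (expr : String) : Int :=
  pvSolGo (pvSplitExprGo expr.toList []) [] [] false

-- ===== PORT B =====
-- group_sum: sum(int(t) for t in part.split('+') if t.isdigit())
def pvGroupSum (part : List Char) : Int :=
  (((PySem.Chars.splitOn part ['+']).filter PySem.Chars.strIsdigit).map
    (fun t => (PySem.Int.ofChars? t).getD 0)).sum

def solution_alt (expr : String) : Int :=
  match PySem.Chars.splitOn expr.toList ['-'] with
  | [] => 0   -- unreachable: split always returns at least one part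
  | p :: rest => pvGroupSum p - (rest.map pvGroupSum).sum

-- ===== PRECONDITION & SPEC =====
def Spec_solution (expr : String) (out : Int) : Prop := out = solution_alt expr
instance (expr : String) (out : Int) : Decidable (Spec_solution expr out) := by unfold Spec_solution; infer_instance

-- ===== CLAIM (what is proved, stated in full; the proofs are below) =====
def Claim_equal_solution : Prop := ∀ (expr : String), Dom_solution expr → Spec_solution expr (solution expr)

-- ===== LEMMAS AND PROOFS =====

-- prepend a prefix onto the first part of a split
def pvConsHead (pre : List Char) : List (List Char) → List (List Char)
  | [] => [pre]
  | h :: t => (pre ++ h) :: t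

-- reference single-character splitter
def pvSplitCh (d : Char) : List Char → List (List Char)
  | [] => [[]]
  | c :: rest => if c = d then [] :: pvSplitCh d rest else pvConsHead [c] (pvSplitCh d rest)

-- accumulator form mirroring PySem.Chars.splitOn.go for a one-character separator
def pvSgo (d : Char) : List Char → List Char → List (List Char) → List (List Char)
  | [], cur, acc => (cur.reverse :: acc).reverse
  | c :: rest, cur, acc =>
      if c = d then pvSgo d rest [] (cur.reverse :: acc) else pvSgo d rest (c :: cur) acc

def pvSgn (flag : Bool) : Int := if flag then -1 else 1

def pvTokval (t : List Char) : Int :=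
  if PySem.Chars.strIsdigit t then (PySem.Int.ofChars? t).getD 0 else 0

-- common reference evaluator: signed sum of digit tokens, char by char
def pvF : List Char → List Char → Bool → Int
  | [], tmp, flag => pvSgn flag * pvTokval tmp
  | c :: rest, tmp, flag =>
      if c = '-' then pvSgn flag * pvTokval tmp + pvF rest [] true
      else if c = '+' then pvSgn flag * pvTokval tmp + pvF rest [] flag
      else pvF rest (tmp ++ [c]) flag

def pvGval (p : List Char) : Int := ((pvSplitCh '+' p).map pvTokval).sum

def pvBval : List (List Char) → Bool → Int
  | [], _ => 0
  | p :: rest, flag => pvSgn flag * pvGval p + pvBval rest true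

theorem pvSplitCh_ne_nil (d : Char) (l : List Char) : pvSplitCh d l ≠ [] := by
  cases l with
  | nil => simp [pvSplitCh]
  | cons c rest =>
      simp only [pvSplitCh]
      split
      · simp
      · cases h : pvSplitCh d rest <;> simp [pvConsHead]

theorem pvConsHead_nil_of_ne (x : List (List Char)) (h : x ≠ []) : pvConsHead [] x = x := by
  cases x with
  | nil => exact absurd rfl h
  | cons a t => simp [pvConsHead]

theorem pvConsHead_comp (x y : List Char) (z : List (List Char)) :
    pvConsHead x (pvConsHead y z) = pvConsHead (x ++ y) z := by
  cases z <;> simp [pvConsHead]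

theorem pvSgo_eq (d : Char) : ∀ (l cur : List Char) (acc : List (List Char)),
    pvSgo d l cur acc = acc.reverse ++ pvConsHead cur.reverse (pvSplitCh d l) := by
  intro l
  induction l with
  | nil => intro cur acc; simp [pvSgo, pvSplitCh, pvConsHead]
  | cons c rest ih =>
      intro cur acc
      simp only [pvSgo, pvSplitCh]
      split
      · rw [ih]
        simp only [List.reverse_nil, List.reverse_cons,
          pvConsHead_nil_of_ne _ (pvSplitCh_ne_nil d rest)]
        simp [pvConsHead]
      · rw [ih]
        simp [pvConsHead_comp]

theorem pvGo_eq (d : Char) : ∀ (fuel : Nat) (l cur : List Char) (acc : List (List Char)),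
    l.length ≤ fuel →
    PySem.Chars.splitOn.go [d] fuel l cur acc = pvSgo d l cur acc := by
  intro fuel
  induction fuel with
  | zero =>
      intro l cur acc h
      have : l = [] := List.eq_nil_of_length_eq_zero (Nat.le_zero.mp h)
      subst this
      simp [PySem.Chars.splitOn.go, pvSgo]
  | succ n ih =>
      intro l cur acc h
      cases l with
      | nil => simp [PySem.Chars.splitOn.go, pvSgo]
      | cons c rest =>
          have hpre : ([d].isPrefixOf (c :: rest)) = (d == c) := by
            simp [List.isPrefixOf]
          simp only [List.length_cons] at h
          by_cases hc' : c = d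
          · subst hc'
            simp only [PySem.Chars.splitOn.go, pvSgo, hpre, beq_self_eq_true,
              List.length_singleton, List.drop_succ_cons, List.drop_zero, if_true]
            exact ih rest [] _ (by omega)
          · have hb : (d == c) = false := by
              simp only [beq_eq_false_iff_ne, ne_eq]
              exact fun he => hc' he.symm
            simp only [PySem.Chars.splitOn.go, pvSgo, hpre, hb, Bool.false_eq_true, if_false,
              if_neg hc']
            exact ih rest (c :: cur) acc (by omega)

theorem pvSplitOn_eq (d : Char) (cs : List Char) :
    PySem.Chars.splitOn cs [d] = pvSplitCh d cs := by
  unfold PySem.Chars.splitOn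
  rw [pvGo_eq d (cs.length + 1) cs [] [] (by omega), pvSgo_eq]
  simp [pvConsHead_nil_of_ne _ (pvSplitCh_ne_nil d cs)]

theorem pvSolGo_cons (s : List Char) (rest : List (List Char)) (plus minus : List Int) (flag : Bool) :
    pvSolGo (s :: rest) plus minus flag =
      if s = ['-'] then pvSolGo rest plus minus true
      else if flag && PySem.Chars.strIsdigit s then
        pvSolGo rest plus (minus ++ [(PySem.Int.ofChars? s).getD 0]) flag
      else if !flag && PySem.Chars.strIsdigit s then
        pvSolGo rest (plus ++ [(PySem.Int.ofChars? s).getD 0]) minus flag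
      else pvSolGo rest plus minus flag := rfl

-- A's loop computes the reference evaluator
theorem pvA_eq (cs : List Char) : ∀ (tmp : List Char) (plus minus : List Int) (flag : Bool),
    '-' ∉ tmp →
    pvSolGo (pvSplitExprGo cs tmp) plus minus flag = plus.sum - minus.sum + pvF cs tmp flag := by
  induction cs with
  | nil =>
      intro tmp plus minus flag hm
      have hne : tmp ≠ ['-'] := fun he => hm (he ▸ by simp)
      simp only [pvSplitExprGo, pvSolGo, pvF]
      rw [if_neg hne]
      by_cases hd : PySem.Chars.strIsdigit tmp = true
      · cases flag <;> simp [hd, pvTokval, pvSgn] <;> ring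
      · cases flag <;> simp [hd, pvTokval, pvSgn]
  | cons c rest ih =>
      intro tmp plus minus flag hm
      have hne : tmp ≠ ['-'] := fun he => hm (he ▸ by simp)
      by_cases hdelim : c = '+' ∨ c = '-'
      · -- tmp token is emitted, then the delimiter token [c]
        simp only [pvSplitExprGo, if_pos hdelim]
        have ihE : ∀ (p m : List Int) (f : Bool),
            pvSolGo (pvSplitExprGo rest []) p m f = p.sum - m.sum + pvF rest [] f :=
          fun p m f => ih [] p m f (by simp)
        rcases hdelim with hc | hc <;> subst hc
        · have h1 : ∀ (p m : List Int) (f : Bool),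
              pvSolGo (['+'] :: pvSplitExprGo rest []) p m f = p.sum - m.sum + pvF rest [] f := by
            intro p m f
            have e1 : ¬ (['+'] = ['-'] : Prop) := by decide
            have e2 : PySem.Chars.strIsdigit ['+'] = false := by decide
            rw [pvSolGo_cons, if_neg e1]
            simp only [e2, Bool.and_false, Bool.false_eq_true, if_false]
            exact ihE p m f
          rw [pvSolGo_cons, if_neg hne]
          by_cases hd : PySem.Chars.strIsdigit tmp = true
          · cases flag <;> simp [hd, h1, pvF, pvTokval, pvSgn] <;> ring
          · have hd' : PySem.Chars.strIsdigit tmp = false := by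
              cases h : PySem.Chars.strIsdigit tmp
              · rfl
              · exact absurd h hd
            cases flag <;> simp [hd', h1, pvF, pvTokval, pvSgn]
        · have h1 : ∀ (p m : List Int) (f : Bool),
              pvSolGo (['-'] :: pvSplitExprGo rest []) p m f = p.sum - m.sum + pvF rest [] true := by
            intro p m f
            rw [pvSolGo_cons, if_pos rfl]
            exact ihE p m true
          rw [pvSolGo_cons, if_neg hne]
          by_cases hd : PySem.Chars.strIsdigit tmp = true
          · cases flag <;> simp [hd, h1, pvF, pvTokval, pvSgn] <;> ring
          · have hd' : PySem.Chars.strIsdigit tmp = false := by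
              cases h : PySem.Chars.strIsdigit tmp
              · rfl
              · exact absurd h hd
            cases flag <;> simp [hd', h1, pvF, pvTokval, pvSgn]
      · have hplus : ¬ c = '+' := fun h => hdelim (Or.inl h)
        have hminus : ¬ c = '-' := fun h => hdelim (Or.inr h)
        simp only [pvSplitExprGo, if_neg hdelim, pvF, if_neg hplus, if_neg hminus]
        exact ih (tmp ++ [c]) plus minus flag (by
          intro hmem
          rcases List.mem_append.mp hmem with h1 | h2
          · exact hm h1
          · exact hminus (by simpa [eq_comm] using List.mem_singleton.mp h2))

theorem pvFilterSum (ts : List (List Char)) :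
    ((ts.filter PySem.Chars.strIsdigit).map (fun t => (PySem.Int.ofChars? t).getD 0)).sum =
      (ts.map pvTokval).sum := by
  induction ts with
  | nil => simp
  | cons t rest ih =>
      by_cases hd : PySem.Chars.strIsdigit t = true <;>
        simp [hd, pvTokval, ih]

theorem pvSplitCh_append_of_not_mem (d : Char) :
    ∀ (a l : List Char), d ∉ a → pvSplitCh d (a ++ l) = pvConsHead a (pvSplitCh d l) := by
  intro a
  induction a with
  | nil => intro l _; simp [pvConsHead_nil_of_ne _ (pvSplitCh_ne_nil d l)]
  | cons c a' ih =>
      intro l hmem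
      have hc : ¬ c = d := fun he => hmem (he ▸ by simp)
      simp only [List.cons_append, pvSplitCh, if_neg hc]
      rw [ih l (fun h => hmem (List.mem_cons_of_mem _ h)), pvConsHead_comp]
      simp

theorem pvSplitCh_no_d (d : Char) (p : List Char) (h : d ∉ p) : pvSplitCh d p = [p] := by
  have := pvSplitCh_append_of_not_mem d p [] h
  simpa [pvSplitCh, pvConsHead] using this

theorem pvGval_no_plus (p : List Char) (h : '+' ∉ p) : pvGval p = pvTokval p := by
  simp [pvGval, pvSplitCh_no_d '+' p h]

-- the reference evaluator equals B's grouped evaluation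
theorem pvMain (cs : List Char) : ∀ (tmp : List Char) (flag : Bool),
    '+' ∉ tmp → '-' ∉ tmp →
    pvF cs tmp flag = pvBval (pvConsHead tmp (pvSplitCh '-' cs)) flag := by
  induction cs with
  | nil =>
      intro tmp flag hp hm
      simp [pvF, pvSplitCh, pvConsHead, pvBval, pvGval_no_plus tmp hp]
  | cons c rest ih =>
      intro tmp flag hp hm
      by_cases hminus : c = '-'
      · subst hminus
        have hS : pvSplitCh '-' ('-' :: rest) = [] :: pvSplitCh '-' rest := by simp [pvSplitCh]
        have hF : pvF ('-' :: rest) tmp flag = pvSgn flag * pvTokval tmp + pvF rest [] true := by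
          simp [pvF]
        rw [hF, hS, ih [] true (by simp) (by simp),
          pvConsHead_nil_of_ne _ (pvSplitCh_ne_nil '-' rest)]
        simp [pvConsHead, pvBval, pvGval_no_plus tmp hp]
      · by_cases hplus : c = '+'
        · subst hplus
          have hS : pvSplitCh '-' ('+' :: rest) = pvConsHead ['+'] (pvSplitCh '-' rest) := by
            simp [pvSplitCh]
          have hF : pvF ('+' :: rest) tmp flag = pvSgn flag * pvTokval tmp + pvF rest [] flag := by
            simp [pvF]
          obtain ⟨h0, t0, hsplit⟩ : ∃ h0 t0, pvSplitCh '-' rest = h0 :: t0 := by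
            cases h : pvSplitCh '-' rest with
            | nil => exact absurd h (pvSplitCh_ne_nil '-' rest)
            | cons a b => exact ⟨a, b, rfl⟩
          have hgv : pvGval (tmp ++ '+' :: h0) = pvTokval tmp + pvGval h0 := by
            unfold pvGval
            rw [pvSplitCh_append_of_not_mem '+' tmp ('+' :: h0) hp]
            have hS' : pvSplitCh '+' ('+' :: h0) = [] :: pvSplitCh '+' h0 := by simp [pvSplitCh]
            rw [hS']
            simp [pvConsHead]
          rw [hF, hS, ih [] flag (by simp) (by simp),
            pvConsHead_nil_of_ne _ (pvSplitCh_ne_nil '-' rest), hsplit]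
          simp only [pvConsHead, pvBval, List.singleton_append]
          rw [hgv]
          ring
        · have hS : pvSplitCh '-' (c :: rest) = pvConsHead [c] (pvSplitCh '-' rest) := by
            simp [pvSplitCh, hminus]
          have hF : pvF (c :: rest) tmp flag = pvF rest (tmp ++ [c]) flag := by
            simp [pvF, hminus, hplus]
          rw [hF, hS, pvConsHead_comp,
            ih (tmp ++ [c]) flag
              (by intro h; rcases List.mem_append.mp h with h1 | h2
                  · exact hp h1
                  · exact hplus (by simpa [eq_comm] using List.mem_singleton.mp h2))
              (by intro h; rcases List.mem_append.mp h with h1 | h2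
                  · exact hm h1
                  · exact hminus (by simpa [eq_comm] using List.mem_singleton.mp h2))]

theorem pvBval_true (rest : List (List Char)) :
    pvBval rest true = -((rest.map pvGval).sum) := by
  induction rest with
  | nil => simp [pvBval]
  | cons p t ih => simp [pvBval, ih, pvSgn]; ring

-- ===== VERDICT (by name: the statement is the Claim_ definition above) =====
theorem solution_spec : Claim_equal_solution := by
  unfold Claim_equal_solution
  intro expr _
  unfold Spec_solution solution solution_alt
  rw [pvA_eq expr.toList [] [] [] false (by simp)]
  rw [pvMain expr.toList [] false (by simp) (by simp),
    pvConsHead_nil_of_ne _ (pvSplitCh_ne_nil '-' expr.toList),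
    pvSplitOn_eq '-' expr.toList]
  obtain ⟨h0, t0, hsplit⟩ : ∃ h0 t0, pvSplitCh '-' expr.toList = h0 :: t0 := by
    cases h : pvSplitCh '-' expr.toList with
    | nil => exact absurd h (pvSplitCh_ne_nil '-' expr.toList)
    | cons a b => exact ⟨a, b, rfl⟩
  rw [hsplit]
  simp only [pvBval, pvBval_true]
  have hg : pvGroupSum = pvGval := by
    funext p
    unfold pvGroupSum pvGval
    rw [pvSplitOn_eq '+' p, pvFilterSum]
  rw [hg]
  simp [pvSgn]
  ring
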